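-- pv_equiv track=rewrite | github.com/tmtfx/HaiPO | HaiPO.py | get_all_splits
-- ===== SOURCE A (Python) =====
-- def byte_count(stringa, encoding='utf-8'):
-- 		byte_counts = []
-- 		start = 0
-- 		total = 0
-- 		for char in stringa:
-- 			end = start + len(char.encode(encoding))
-- 			total+=(end- start)
-- 			byte_counts.append((char,end - start))
-- 			start = end
-- 		return (total,byte_counts)
--
-- def is_text_before_first(text,word):
-- 	r=text.find(word)
-- 	if r==-1:
-- 		return(False,None)
-- 	elif r==0:
-- 		return(False,"")
-- 	else:
-- 		return(True,text[:r])
--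
-- def get_all_splits(text):
-- 	words = text.split()
-- 	newarr=[]
-- 	spacing_list = []
-- 	i=0
-- 	byte_offset=0
-- 	b,t=is_text_before_first(text,words[0])
-- 	if b:
-- 		bc=byte_count(t)
-- 		newarr.append((False,t,bc[0],byte_offset))#False = do not spellcheck
-- 		text=text[text.find(words[0]):]
-- 		byte_offset+=bc[0]
-- 	while i<len(words)-1:
-- 		bc=byte_count(words[i])
-- 		newarr.append((True,words[i],bc[0],byte_offset))
-- 		byte_offset+=bc[0]
-- 		text=text[text.find(words[i])+len(words[i]):]
-- 		tst=text[:text.find(words[i+1])]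
-- 		bc=byte_count(tst)
-- 		newarr.append((False,tst,bc[0],byte_offset))
-- 		byte_offset+=bc[0]
-- 		text=text[text.find(words[i+1]):]
-- 		words=text.split()
--
-- 	bc=byte_count(words[-1])
-- 	newarr.append((True,words[-1],bc[0],byte_offset))
-- 	byte_offset+=bc[0]
-- 	text=text[text.find(words[-1])+len(words[-1]):]
-- 	if text!="":
-- 		bc=byte_count(text)
-- 		newarr.append((False,text,bc[0],byte_offset))
--
-- 	return newarr
-- ===== SOURCE B (Python) =====
-- def get_all_splits(text):
--     # One linear scan over maximal runs of equal whitespace-ness (O(n) vs A's repeated find/split/slice).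
--     out = []
--     byte_offset = 0
--     i = 0
--     n = len(text)
--     while i < n:
--         is_sp = text[i].isspace()
--         j = i + 1
--         while j < n and text[j].isspace() == is_sp:
--             j += 1
--         seg = text[i:j]
--         blen = len(seg.encode('utf-8'))
--         out.append((not is_sp, seg, blen, byte_offset))
--         byte_offset += blen
--         i = j
--     return out
-- ===== Notes on version B (the rewrite author's own statement) =====
-- stated objective: faster
-- what changed: A repeatedly re-splits and re-scans the remaining text with str.split/str.find and slicing inside a while loop; B does one linear left-to-right scan that flushes each maximal run of equal whitespace-ness with its byte length and running byte offset.
-- crash fix: On empty or all-whitespace text A raises IndexError (words[0] of an empty split); B returns [] for empty text and a single (False, text, bytelen, 0) whitespace segment otherwise. — e.g. on get_all_splits(" "): A raises IndexError, B returns [(false, " ", 1, 0)]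
import Mathlib
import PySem

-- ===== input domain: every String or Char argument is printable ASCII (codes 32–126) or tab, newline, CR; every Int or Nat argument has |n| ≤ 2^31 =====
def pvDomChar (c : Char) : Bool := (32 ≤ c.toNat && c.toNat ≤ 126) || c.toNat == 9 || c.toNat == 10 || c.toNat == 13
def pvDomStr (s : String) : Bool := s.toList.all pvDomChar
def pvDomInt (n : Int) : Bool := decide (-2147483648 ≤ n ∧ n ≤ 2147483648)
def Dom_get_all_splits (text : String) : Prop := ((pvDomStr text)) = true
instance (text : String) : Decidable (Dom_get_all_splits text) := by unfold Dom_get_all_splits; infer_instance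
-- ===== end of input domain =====

-- B replaces A's repeated re-split/find/slice loop by one linear scan over maximal
-- runs of equal whitespace-ness (objective: faster).

-- ===== PORT A =====
abbrev PvSeg := Bool × List Char × Int × Int

-- byte_count: fold over the characters keeping (start, total, byte_counts)
def pvBC (cs : List Char) : Int × List (Char × Int) :=
  let st := cs.foldl
    (fun (st : Int × Int × List (Char × Int)) ch =>
      let start := st.1
      let e := start + (ch.utf8Size : Int)
      (e, st.2.1 + (e - start), st.2.2 ++ [(ch, e - start)]))
    (0, 0, [])
  (st.2.1, st.2.2)

-- is_text_before_first
def pvITBF (text word : List Char) : Bool × Option (List Char) :=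
  let r := PySem.Chars.find text word
  if r = -1 then (false, none)
  else if r = 0 then (false, some [])
  else (true, some (PySem.Chars.slice text none (some r)))

-- the while loop (i stays 0 in A; kept as a parameter); the code after the loop is the
-- else branch. fuel only makes the recursion total (the text shrinks every iteration).
def pvALoop (fuel : Nat) (text : List Char) (words : List (List Char)) (i : Int)
    (newarr : List PvSeg) (off : Int) : List PvSeg :=
  match fuel with
  | 0 => newarr
  | fuel + 1 =>
    if i < (words.length : Int) - 1 then
      let wi := PySem.List.pyGetD words i []
      let bc := pvBC wi
      let newarr := newarr ++ [(true, wi, bc.1, off)]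
      let off := off + bc.1
      let text := PySem.Chars.slice text (some (PySem.Chars.find text wi + (wi.length : Int))) none
      let wi1 := PySem.List.pyGetD words (i + 1) []
      let tst := PySem.Chars.slice text none (some (PySem.Chars.find text wi1))
      let bc2 := pvBC tst
      let newarr := newarr ++ [(false, tst, bc2.1, off)]
      let off := off + bc2.1
      let text := PySem.Chars.slice text (some (PySem.Chars.find text wi1)) none
      let words := PySem.Chars.split₀ text
      pvALoop fuel text words i newarr off
    else
      let wl := PySem.List.pyGetD words (-1) []
      let bc := pvBC wl
      let newarr := newarr ++ [(true, wl, bc.1, off)]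
      let off := off + bc.1
      let text := PySem.Chars.slice text (some (PySem.Chars.find text wl + (wl.length : Int))) none
      if text ≠ [] then newarr ++ [(false, text, (pvBC text).1, off)] else newarr

def pvACore (cs : List Char) : List PvSeg :=
  let words := PySem.Chars.split₀ cs
  let w0 := PySem.List.pyGetD words 0 []
  let bt := pvITBF cs w0
  let st :=
    if bt.1 then
      match bt.2 with
      | some t =>
        let bc := pvBC t
        (([(false, t, bc.1, (0 : Int))] : List PvSeg),
         PySem.Chars.slice cs (some (PySem.Chars.find cs w0)) none, bc.1)
      | none => (([] : List PvSeg), cs, (0 : Int))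
    else (([] : List PvSeg), cs, (0 : Int))
  pvALoop (st.2.1.length + 1) st.2.1 words 0 st.1 st.2.2

def get_all_splits (text : String) : List (Bool × String × Int × Int) :=
  (pvACore text.toList).map (fun s => (s.1, String.ofList s.2.1, s.2.2))

-- ===== PORT B =====
def pvBytes (cs : List Char) : Int := (cs.map (fun c => (c.utf8Size : Int))).sum

def pvBGo (cs : List Char) (off : Int) : List PvSeg :=
  match cs with
  | [] => []
  | c :: rest =>
    let sp := PySem.Chars.isspace c
    let run := c :: rest.takeWhile (fun d => PySem.Chars.isspace d == sp)
    let b := pvBytes run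
    (!sp, run, b, off) :: pvBGo (rest.dropWhile (fun d => PySem.Chars.isspace d == sp)) (off + b)
termination_by cs.length
decreasing_by
  simp only [List.length_cons]
  exact Nat.lt_succ_of_le (List.length_dropWhile_le _ _)

def get_all_splits_alt (text : String) : List (Bool × String × Int × Int) :=
  (pvBGo text.toList 0).map (fun s => (s.1, String.ofList s.2.1, s.2.2))

-- ===== PRECONDITION & SPEC =====
-- A raises IndexError (words[0] of an empty split) when the text has no non-whitespace
-- character; exactly those inputs are excluded.
def Pre_get_all_splits (text : String) : Prop :=
  text.toList.any (fun c => !PySem.Chars.isspace c) = true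
instance (text : String) : Decidable (Pre_get_all_splits text) := by
  unfold Pre_get_all_splits; infer_instance

def pvWitness_get_all_splits : String := " a b "

-- On empty or all-whitespace text A raises IndexError; B returns [] for empty text and
-- a single (False, text, bytelen, 0) whitespace segment otherwise.
def Raises_get_all_splits (text : String) : Prop :=
  text.toList.all (fun c => PySem.Chars.isspace c) = true
instance (text : String) : Decidable (Raises_get_all_splits text) := by
  unfold Raises_get_all_splits; infer_instance

def pvRaiseWitness_get_all_splits : String := " "
def pvRaiseWitnessOut_get_all_splits : List (Bool × String × Int × Int) := [(false, " ", 1, 0)]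

def Spec_get_all_splits (text : String) (out : List (Bool × String × Int × Int)) : Prop :=
  out = get_all_splits_alt text
instance (text : String) (out : List (Bool × String × Int × Int)) : Decidable (Spec_get_all_splits text out) := by
  unfold Spec_get_all_splits; infer_instance

-- ===== CLAIM (what is proved, stated in full; the proofs are below) =====
def Claim_equal_get_all_splits : Prop :=
  ∀ (text : String), Dom_get_all_splits text → Pre_get_all_splits text →
    Spec_get_all_splits text (get_all_splits text)

def Claim_raises_get_all_splits : Prop :=
  (∀ (text : String), Dom_get_all_splits text → Raises_get_all_splits text → ¬ Pre_get_all_splits text) ∧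
  (Dom_get_all_splits (pvRaiseWitness_get_all_splits) ∧ Raises_get_all_splits (pvRaiseWitness_get_all_splits) ∧
   get_all_splits_alt (pvRaiseWitness_get_all_splits) = pvRaiseWitnessOut_get_all_splits)

-- ===== LEMMAS AND PROOFS =====

-- byte_count's running total is the sum of the characters' UTF-8 sizes
theorem pvBC_aux (cs : List Char) (s t : Int) (l : List (Char × Int)) :
    (cs.foldl
      (fun (st : Int × Int × List (Char × Int)) ch =>
        let start := st.1
        let e := start + (ch.utf8Size : Int)
        (e, st.2.1 + (e - start), st.2.2 ++ [(ch, e - start)]))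
      (s, t, l)).2.1 = t + pvBytes cs := by
  induction cs generalizing s t l with
  | nil => simp [pvBytes]
  | cons c cs ih =>
    simp only [List.foldl_cons]
    rw [ih]
    simp [pvBytes]
    ring

theorem pvBC_fst (cs : List Char) : (pvBC cs).1 = pvBytes cs := by
  have := pvBC_aux cs 0 0 []
  simpa [pvBC] using this

-- a word (nonempty, no whitespace) is never a prefix of a list starting with whitespace
theorem pv_not_prefix (c : Char) (l w : List Char) (hc : PySem.Chars.isspace c = true)
    (hw : ∀ d ∈ w, PySem.Chars.isspace d = false) (hne : w ≠ []) :
    w.isPrefixOf (c :: l) = false := by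
  cases w with
  | nil => exact absurd rfl hne
  | cons a w' =>
    rw [Bool.eq_false_iff]
    intro h
    have hpre : (a :: w') <+: (c :: l) := List.isPrefixOf_iff_prefix.mp h
    rcases List.cons_prefix_cons.mp hpre with ⟨rfl, -⟩
    have := hw a (by simp)
    rw [this] at hc
    exact absurd hc (by decide)

-- find over a leading all-whitespace run
theorem pv_findgo_space (w : List Char) (hne : w ≠ [])
    (hw : ∀ d ∈ w, PySem.Chars.isspace d = false) :
    ∀ (ws : List Char) (l : List Char) (k : Nat), (∀ c ∈ ws, PySem.Chars.isspace c = true) →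
      PySem.Chars.find.go w (ws ++ l) k = PySem.Chars.find.go w l (k + ws.length) := by
  intro ws
  induction ws with
  | nil => intro l k _; simp
  | cons c ws ih =>
    intro l k hws
    have hc := hws c (by simp)
    rw [List.cons_append, PySem.Chars.find.go, pv_not_prefix c (ws ++ l) w hc hw hne]
    simp only [Bool.false_eq_true, if_false]
    rw [ih l (k + 1) (fun d hd => hws d (by simp [hd]))]
    congr 1
    simp
    omega

theorem pv_find_word (ws w rest : List Char) (hws : ∀ c ∈ ws, PySem.Chars.isspace c = true)
    (hne : w ≠ []) (hw : ∀ d ∈ w, PySem.Chars.isspace d = false) :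
    PySem.Chars.find (ws ++ w ++ rest) w = (ws.length : Int) := by
  rw [PySem.Chars.find, List.append_assoc, pv_findgo_space w hne hw ws (w ++ rest) 0 hws]
  cases hww : w ++ rest with
  | nil => exact absurd (List.append_eq_nil_iff.mp hww).1 hne
  | cons a l =>
    rw [PySem.Chars.find.go]
    have : w.isPrefixOf (a :: l) = true := by
      rw [List.isPrefixOf_iff_prefix, ← hww]
      exact List.prefix_append w rest
    rw [this]
    simp

-- split₀.go: the accumulator only contributes a (reversed) prefix of the result
theorem pv_splitgo_acc (s : List Char) : ∀ (cur : List Char) (acc : List (List Char)),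
    PySem.Chars.split₀.go s cur acc = acc.reverse ++ PySem.Chars.split₀.go s cur [] := by
  induction s with
  | nil =>
    intro cur acc
    rw [PySem.Chars.split₀.go]
    conv_rhs => rw [PySem.Chars.split₀.go]
    by_cases h : cur.isEmpty = true
    · rw [if_pos h, if_pos h]; simp
    · rw [if_neg h, if_neg h]; simp
  | cons c s ih =>
    intro cur acc
    rw [PySem.Chars.split₀.go]
    conv_rhs => rw [PySem.Chars.split₀.go]
    by_cases hc : PySem.Chars.isspace c = true
    · rw [if_pos hc, if_pos hc]
      by_cases h : cur.isEmpty = true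
      · rw [if_pos h, if_pos h]
        exact ih [] acc
      · rw [if_neg h, if_neg h, ih [] (cur.reverse :: acc), ih [] [cur.reverse]]
        simp
    · rw [if_neg hc, if_neg hc]
      exact ih (c :: cur) acc

theorem pv_splitgo_space (ws : List Char) (hws : ∀ c ∈ ws, PySem.Chars.isspace c = true) :
    ∀ (s : List Char) (acc : List (List Char)),
      PySem.Chars.split₀.go (ws ++ s) [] acc = PySem.Chars.split₀.go s [] acc := by
  induction ws with
  | nil => intro s acc; simp
  | cons c ws ih =>
    intro s acc
    have hc := hws c (by simp)
    rw [List.cons_append, PySem.Chars.split₀.go, if_pos hc, if_pos (by simp)]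
    exact ih (fun d hd => hws d (by simp [hd])) s acc

theorem pv_splitgo_word (w : List Char) (hw : ∀ d ∈ w, PySem.Chars.isspace d = false) :
    ∀ (s cur : List Char) (acc : List (List Char)),
      PySem.Chars.split₀.go (w ++ s) cur acc = PySem.Chars.split₀.go s (w.reverse ++ cur) acc := by
  induction w with
  | nil => intro s cur acc; simp
  | cons c w ih =>
    intro s cur acc
    have hc := hw c (by simp)
    rw [List.cons_append, PySem.Chars.split₀.go, if_neg (by simp [hc])]
    rw [ih (fun d hd => hw d (by simp [hd])) s (c :: cur) acc]
    simp

theorem pv_split_all_space (s : List Char) (hs : ∀ c ∈ s, PySem.Chars.isspace c = true) :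
    PySem.Chars.split₀ s = [] := by
  rw [PySem.Chars.split₀]
  have h := pv_splitgo_space s hs [] []
  simp only [List.append_nil] at h
  rw [h, PySem.Chars.split₀.go]
  simp

theorem pv_split_decomp (ws w rest : List Char)
    (hws : ∀ c ∈ ws, PySem.Chars.isspace c = true)
    (hne : w ≠ []) (hw : ∀ d ∈ w, PySem.Chars.isspace d = false)
    (hrest : rest = [] ∨ ∃ r t, rest = r :: t ∧ PySem.Chars.isspace r = true) :
    PySem.Chars.split₀ (ws ++ w ++ rest) = w :: PySem.Chars.split₀ rest := by
  rw [PySem.Chars.split₀, List.append_assoc, pv_splitgo_space ws hws,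
      pv_splitgo_word w hw]
  have hE : ¬ (w.reverse ++ ([] : List Char)).isEmpty = true := by
    simp [hne]
  rcases hrest with rfl | ⟨r, t, rfl, hr⟩
  · rw [PySem.Chars.split₀.go, if_neg hE]
    simp [PySem.Chars.split₀, PySem.Chars.split₀.go]
  · rw [PySem.Chars.split₀.go, if_pos hr, if_neg hE, pv_splitgo_acc,
        PySem.Chars.split₀, PySem.Chars.split₀.go, if_pos hr, if_pos (by simp)]
    simp

-- takeWhile/dropWhile over a maximal run
theorem pv_takeWhile_run (p : Char → Bool) (xs rest : List Char)
    (hxs : ∀ x ∈ xs, p x = true)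
    (hrest : rest = [] ∨ ∃ r t, rest = r :: t ∧ p r = false) :
    (xs ++ rest).takeWhile p = xs ∧ (xs ++ rest).dropWhile p = rest := by
  induction xs with
  | nil =>
    rcases hrest with rfl | ⟨r, t, rfl, hr⟩
    · simp
    · simp [hr]
  | cons x xs ih =>
    have hx := hxs x (by simp)
    have h := ih (fun d hd => hxs d (by simp [hd]))
    simp [hx, h.1, h.2]

theorem pv_bGo_nil (off : Int) : pvBGo [] off = [] := by
  rw [pvBGo]

-- the B-side flush: one maximal run produces one segment
theorem pv_bGo_flush (run rest : List Char) (off : Int) (sp : Bool) (hne : run ≠ [])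
    (hrun : ∀ c ∈ run, PySem.Chars.isspace c = sp)
    (hrest : rest = [] ∨ ∃ r t, rest = r :: t ∧ PySem.Chars.isspace r = (!sp)) :
    pvBGo (run ++ rest) off = (!sp, run, pvBytes run, off) :: pvBGo rest (off + pvBytes run) := by
  cases run with
  | nil => exact absurd rfl hne
  | cons c run' =>
    have hc := hrun c (by simp)
    subst hc
    have hTD := pv_takeWhile_run (fun d => PySem.Chars.isspace d == PySem.Chars.isspace c)
      run' rest (fun d hd => by simp [hrun d (by simp [hd])])
      (by rcases hrest with rfl | ⟨r, t, rfl, hr⟩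
          · exact Or.inl rfl
          · exact Or.inr ⟨r, t, rfl, by simp [hr]⟩)
    rw [List.cons_append, pvBGo]
    simp only [hTD.1, hTD.2]

-- a nonempty all-space run exists nowhere we need a word: decomposition helpers
theorem pv_word_split (cs : List Char) :
    ∃ w rest, cs = w ++ rest ∧ (∀ d ∈ w, PySem.Chars.isspace d = false) ∧
      (rest = [] ∨ ∃ r t, rest = r :: t ∧ PySem.Chars.isspace r = true) := by
  induction cs with
  | nil => exact ⟨[], [], rfl, by simp, Or.inl rfl⟩
  | cons c cs ih =>
    by_cases hc : PySem.Chars.isspace c = true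
    · exact ⟨[], c :: cs, rfl, by simp, Or.inr ⟨c, cs, rfl, hc⟩⟩
    · obtain ⟨w, rest, rfl, hw, hr⟩ := ih
      refine ⟨c :: w, rest, rfl, ?_, hr⟩
      intro d hd
      rcases List.mem_cons.mp hd with rfl | hd'
      · exact Bool.eq_false_iff.mpr hc
      · exact hw d hd'

theorem pv_decomp (cs : List Char) (h : ∃ c ∈ cs, PySem.Chars.isspace c = false) :
    ∃ ws w rest, cs = ws ++ w ++ rest ∧ (∀ c ∈ ws, PySem.Chars.isspace c = true) ∧
      w ≠ [] ∧ (∀ d ∈ w, PySem.Chars.isspace d = false) ∧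
      (rest = [] ∨ ∃ r t, rest = r :: t ∧ PySem.Chars.isspace r = true) := by
  induction cs with
  | nil => simp at h
  | cons c cs ih =>
    by_cases hc : PySem.Chars.isspace c = true
    · have h' : ∃ d ∈ cs, PySem.Chars.isspace d = false := by
        rcases h with ⟨d, hd, hdf⟩
        rcases List.mem_cons.mp hd with rfl | hd'
        · rw [hc] at hdf; exact absurd hdf (by decide)
        · exact ⟨d, hd', hdf⟩
      obtain ⟨ws, w, rest, rfl, h1, h2, h3, h4⟩ := ih h'
      refine ⟨c :: ws, w, rest, rfl, ?_, h2, h3, h4⟩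
      intro d hd
      rcases List.mem_cons.mp hd with rfl | hd'
      · exact hc
      · exact h1 d hd'
    · obtain ⟨w, rest, rfl, hw, hr⟩ := pv_word_split cs
      refine ⟨[], c :: w, rest, rfl, by simp, by simp, ?_, hr⟩
      intro d hd
      rcases List.mem_cons.mp hd with rfl | hd'
      · exact Bool.eq_false_iff.mpr hc
      · exact hw d hd'

theorem pv_getD_one {α : Type} (a b : α) (l : List α) (d : α) :
    PySem.List.pyGetD (a :: b :: l) 1 d = b := by
  simp [pysem]

theorem pv_getD_neg_one_singleton {α : Type} (a : α) (d : α) :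
    PySem.List.pyGetD [a] (-1) d = a := by
  simp [pysem]

-- the loop lemma: from a word-initial text, A's loop appends exactly B's segments
theorem pv_loop (n : Nat) : ∀ (text w rest : List Char) (newarr : List PvSeg) (off : Int) (fuel : Nat),
    text = w ++ rest → w ≠ [] → (∀ d ∈ w, PySem.Chars.isspace d = false) →
    (rest = [] ∨ ∃ r t, rest = r :: t ∧ PySem.Chars.isspace r = true) →
    text.length ≤ n → n < fuel →
    pvALoop fuel text (PySem.Chars.split₀ text) 0 newarr off = newarr ++ pvBGo text off := by
  induction n using Nat.strong_induction_on with
  | _ n ih =>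
    intro text w rest newarr off fuel heq hne hw hrest hlen hfuel
    subst heq
    obtain ⟨fuel, rfl⟩ : ∃ m, fuel = m + 1 := ⟨fuel - 1, by omega⟩
    have hsplit0 : PySem.Chars.split₀ (w ++ rest) = w :: PySem.Chars.split₀ rest := by
      simpa using pv_split_decomp [] w rest (by simp) hne hw hrest
    have hfw : PySem.Chars.find (w ++ rest) w = (0 : Int) := by
      simpa using pv_find_word [] w rest (by simp) hne hw
    have hsliceW : PySem.Chars.slice (w ++ rest) (some ((0 : Int) + (w.length : Int))) none = rest := by
      show PySem.List.slice _ _ _ = _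
      rw [zero_add, PySem.List.slice_from_natCast, List.drop_left]
    by_cases hx : ∃ c ∈ rest, PySem.Chars.isspace c = false
    · -- another word follows: one loop iteration, then induction
      rcases hrest with rfl | ⟨r, t, rfl, hr⟩
      · simp at hx
      have hx' : ∃ d ∈ t, PySem.Chars.isspace d = false := by
        rcases hx with ⟨d, hd, hdf⟩
        rcases List.mem_cons.mp hd with rfl | hd'
        · rw [hr] at hdf; exact absurd hdf (by decide)
        · exact ⟨d, hd', hdf⟩
      obtain ⟨ws', w1, rest2, rfl, hws', hne1, hw1, hrest2⟩ := pv_decomp t hx'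
      have hws1 : ∀ d ∈ r :: ws', PySem.Chars.isspace d = true := by
        intro d hd
        rcases List.mem_cons.mp hd with rfl | hd'
        · exact hr
        · exact hws' d hd'
      have hsplit1 : PySem.Chars.split₀ (r :: (ws' ++ w1 ++ rest2)) = w1 :: PySem.Chars.split₀ rest2 := by
        simpa using pv_split_decomp (r :: ws') w1 rest2 hws1 hne1 hw1 hrest2
      have hfind1 : PySem.Chars.find (r :: (ws' ++ w1 ++ rest2)) w1 = ((ws'.length + 1 : Nat) : Int) := by
        have := pv_find_word (r :: ws') w1 rest2 hws1 hne1 hw1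
        simpa using this
      have hslice_t : PySem.Chars.slice (r :: (ws' ++ w1 ++ rest2)) none (some ((ws'.length + 1 : Nat) : Int)) = r :: ws' := by
        show PySem.List.slice _ _ _ = _
        rw [PySem.List.slice_to_natCast, List.take_succ_cons, List.append_assoc, List.take_left]
      have hslice_d : PySem.Chars.slice (r :: (ws' ++ w1 ++ rest2)) (some ((ws'.length + 1 : Nat) : Int)) none = w1 ++ rest2 := by
        show PySem.List.slice _ _ _ = _
        rw [PySem.List.slice_from_natCast, List.drop_succ_cons, List.append_assoc, List.drop_left]
      have hcond : (0 : Int) < ((w :: w1 :: PySem.Chars.split₀ rest2).length : Int) - 1 := by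
        simp
      rw [hsplit0, hsplit1]
      simp only [pvALoop]
      rw [if_pos hcond]
      rw [PySem.List.pyGetD_zero_cons]
      rw [show (0 : Int) + 1 = 1 from by norm_num, pv_getD_one]
      rw [pvBC_fst, hfw, hsliceW, hfind1, hslice_t, hslice_d, pvBC_fst]
      have hlt : (w1 ++ rest2).length < n := by
        have h1 : 0 < w.length := List.length_pos_of_ne_nil hne
        simp only [List.length_append, List.length_cons] at hlen ⊢
        omega
      rw [ih _ hlt (w1 ++ rest2) w1 rest2 _ _ fuel rfl hne1 hw1 hrest2 le_rfl (by omega)]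
      -- B side
      have hB1 : pvBGo (w ++ (r :: (ws' ++ w1 ++ rest2))) off
          = (true, w, pvBytes w, off) :: pvBGo (r :: (ws' ++ w1 ++ rest2)) (off + pvBytes w) := by
        have := pv_bGo_flush w (r :: (ws' ++ w1 ++ rest2)) off false hne
          (fun d hd => hw d hd) (Or.inr ⟨r, _, rfl, by simp [hr]⟩)
        simpa using this
      have hB2 : pvBGo (r :: (ws' ++ w1 ++ rest2)) (off + pvBytes w)
          = (false, r :: ws', pvBytes (r :: ws'), off + pvBytes w)
            :: pvBGo (w1 ++ rest2) (off + pvBytes w + pvBytes (r :: ws')) := by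
        obtain ⟨a, w1', rfl⟩ : ∃ a w1', w1 = a :: w1' := by
          cases w1 with
          | nil => exact absurd rfl hne1
          | cons a w1' => exact ⟨a, w1', rfl⟩
        have := pv_bGo_flush (r :: ws') (a :: w1' ++ rest2) (off + pvBytes w) true (by simp) hws1
          (Or.inr ⟨a, w1' ++ rest2, rfl, by simp [hw1 a (by simp)]⟩)
        simpa using this
      rw [hB1, hB2]
      simp
    · -- last word: rest is all whitespace
      have hall : ∀ c ∈ rest, PySem.Chars.isspace c = true := by
        intro c hc
        by_contra hcc
        exact hx ⟨c, hc, by simpa using hcc⟩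
      have hsplitnil : PySem.Chars.split₀ rest = [] := pv_split_all_space rest hall
      rw [hsplit0, hsplitnil]
      simp only [pvALoop]
      rw [if_neg (by simp)]
      rw [pv_getD_neg_one_singleton, pvBC_fst, hfw, hsliceW]
      rcases hrest with rfl | ⟨r, t, rfl, hr⟩
      · rw [if_neg (by simp)]
        have hB : pvBGo (w ++ ([] : List Char)) off
            = (true, w, pvBytes w, off) :: pvBGo [] (off + pvBytes w) := by
          have := pv_bGo_flush w [] off false hne (fun d hd => hw d hd) (Or.inl rfl)
          simpa using this
        rw [hB, pv_bGo_nil]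
      · rw [if_pos (by simp), pvBC_fst]
        have hB1 : pvBGo (w ++ (r :: t)) off
            = (true, w, pvBytes w, off) :: pvBGo (r :: t) (off + pvBytes w) := by
          have := pv_bGo_flush w (r :: t) off false hne (fun d hd => hw d hd)
            (Or.inr ⟨r, t, rfl, by simp [hr]⟩)
          simpa using this
        have hB2 : pvBGo (r :: t) (off + pvBytes w)
            = [(false, r :: t, pvBytes (r :: t), off + pvBytes w)] := by
          have := pv_bGo_flush (r :: t) [] (off + pvBytes w) true (by simp) hall (Or.inl rfl)
          simpa [pv_bGo_nil] using this
        rw [hB1, hB2]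
        simp

theorem pv_main (cs : List Char) (h : ∃ c ∈ cs, PySem.Chars.isspace c = false) :
    pvACore cs = pvBGo cs 0 := by
  obtain ⟨ws, w, rest, rfl, hws, hne, hw, hrest⟩ := pv_decomp cs h
  have hsplit : PySem.Chars.split₀ (ws ++ w ++ rest) = w :: PySem.Chars.split₀ rest :=
    pv_split_decomp ws w rest hws hne hw hrest
  have hsplit0 : PySem.Chars.split₀ (w ++ rest) = w :: PySem.Chars.split₀ rest := by
    simpa using pv_split_decomp [] w rest (by simp) hne hw hrest
  have hfind : PySem.Chars.find (ws ++ w ++ rest) w = (ws.length : Int) :=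
    pv_find_word ws w rest hws hne hw
  rcases eq_or_ne ws [] with rfl | hws0
  · -- no leading whitespace: is_text_before_first returns (False, "")
    have hfind' : PySem.Chars.find (w ++ rest) w = (0 : Int) := by simpa using hfind
    have hbt : pvITBF (w ++ rest) w = (false, some []) := by
      rw [pvITBF, hfind']
      norm_num
    simp only [List.nil_append] at hsplit ⊢
    simp only [pvACore, hsplit, PySem.List.pyGetD_zero_cons, hbt]
    norm_num
    rw [← hsplit0]
    have := pv_loop (w ++ rest).length (w ++ rest) w rest [] 0 ((w ++ rest).length + 1)
      rfl hne hw hrest le_rfl (by omega)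
    simpa using this
  · -- leading whitespace: is_text_before_first returns (True, ws)
    have hpos : 0 < ws.length := List.length_pos_of_ne_nil hws0
    have htake : PySem.Chars.slice (ws ++ w ++ rest) none (some (ws.length : Int)) = ws := by
      show PySem.List.slice _ _ _ = _
      rw [PySem.List.slice_to_natCast, List.append_assoc, List.take_left]
    have hdrop : PySem.Chars.slice (ws ++ w ++ rest) (some (ws.length : Int)) none = w ++ rest := by
      show PySem.List.slice _ _ _ = _
      rw [PySem.List.slice_from_natCast, List.append_assoc, List.drop_left]
    have hbt : pvITBF (ws ++ w ++ rest) w = (true, some ws) := by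
      rw [pvITBF, hfind]
      rw [if_neg (by omega), if_neg (by omega)]
      rw [htake]
    simp only [pvACore, hsplit, PySem.List.pyGetD_zero_cons, hbt, hfind, hdrop]
    norm_num
    rw [pvBC_fst]
    rw [← hsplit0]
    have hloop := pv_loop (w ++ rest).length (w ++ rest) w rest
      [(false, ws, pvBytes ws, 0)] (pvBytes ws) ((w ++ rest).length + 1)
      rfl hne hw hrest le_rfl (by omega)
    simp only [List.length_append] at hloop
    rw [hloop]
    -- B side: flush the leading whitespace run
    have hB : pvBGo (ws ++ (w ++ rest)) 0
        = (false, ws, pvBytes ws, 0) :: pvBGo (w ++ rest) (0 + pvBytes ws) := by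
      obtain ⟨a, w', rfl⟩ : ∃ a w', w = a :: w' := by
        cases w with
        | nil => exact absurd rfl hne
        | cons a w' => exact ⟨a, w', rfl⟩
      have := pv_bGo_flush ws (a :: w' ++ rest) 0 true hws0 hws
        (Or.inr ⟨a, w' ++ rest, rfl, by simp [hw a (by simp)]⟩)
      simpa using this
    rw [hB, zero_add]
    simp

theorem pv_alt_space : get_all_splits_alt " " = pvRaiseWitnessOut_get_all_splits := by
  have h0 : (" " : String).toList = [' '] := rfl
  have hflush := pv_bGo_flush [' '] [] 0 true (by simp)
    (by intro c hc; rw [List.mem_singleton] at hc; subst hc; decide) (Or.inl rfl)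
  simp only [List.append_nil] at hflush
  rw [get_all_splits_alt, h0, hflush, pv_bGo_nil]
  have hb : pvBytes [' '] = 1 := by decide
  rw [hb]
  decide

-- ===== VERDICT (by name: the statement is the Claim_ definition above) =====
theorem get_all_splits_spec : Claim_equal_get_all_splits := by
  intro text _ hpre
  unfold Pre_get_all_splits at hpre
  rw [List.any_eq_true] at hpre
  obtain ⟨c, hc, hcf⟩ := hpre
  unfold Spec_get_all_splits get_all_splits get_all_splits_alt
  rw [pv_main text.toList ⟨c, hc, by simpa using hcf⟩]

@[simp]
theorem get_all_splits_raises : Claim_raises_get_all_splits := by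
  unfold Claim_raises_get_all_splits
  refine ⟨?_, ?_, ?_, pv_alt_space⟩
  · intro text _ hr hpre
    unfold Raises_get_all_splits at hr
    unfold Pre_get_all_splits at hpre
    rw [List.all_eq_true] at hr
    rw [List.any_eq_true] at hpre
    obtain ⟨c, hc, hcf⟩ := hpre
    simp [hr c hc] at hcf
  · decide
  · decide
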